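-- pv_equiv track=rewrite | github.com/max4nik/crypto_labs | lab_1_matrix.py | _build_matrix_from_text
-- ===== SOURCE A (Python) =====
-- def _build_matrix_from_text(text, N):
--     result = []
--     current_chunk = []
--
--     for char in text:
--         current_chunk.append(char)
--         if len(current_chunk) == N:
--             result.append(current_chunk)
--             current_chunk = []
--
--     while len(current_chunk) < N:
--         current_chunk.append(' ')
--
--     result.append(current_chunk)
--
--     return result
-- ===== SOURCE B (Python) =====
-- def _build_matrix_from_text(text, N):
--     total = (len(text) // N + 1) * N
--     padded = list(text) + [' '] * (total - len(text))
--     return [padded[i:i + N] for i in range(0, total, N)]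
-- ===== Notes on version B (the rewrite author's own statement) =====
-- stated objective: alternative
-- what changed: A streams characters into a chunk accumulator with a while-loop pad; B computes the padded length in closed form ((len//N+1)*N, keeping A's always-extra-row behaviour), pads once, and slices the padded list at arithmetic offsets.
-- outside the precondition, e.g. on _build_matrix_from_text('ab', 0): A returns [['a', 'b']], B raises ZeroDivisionError; on _build_matrix_from_text('ab', -1): A returns [['a', 'b']], B returns []
import Mathlib
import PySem

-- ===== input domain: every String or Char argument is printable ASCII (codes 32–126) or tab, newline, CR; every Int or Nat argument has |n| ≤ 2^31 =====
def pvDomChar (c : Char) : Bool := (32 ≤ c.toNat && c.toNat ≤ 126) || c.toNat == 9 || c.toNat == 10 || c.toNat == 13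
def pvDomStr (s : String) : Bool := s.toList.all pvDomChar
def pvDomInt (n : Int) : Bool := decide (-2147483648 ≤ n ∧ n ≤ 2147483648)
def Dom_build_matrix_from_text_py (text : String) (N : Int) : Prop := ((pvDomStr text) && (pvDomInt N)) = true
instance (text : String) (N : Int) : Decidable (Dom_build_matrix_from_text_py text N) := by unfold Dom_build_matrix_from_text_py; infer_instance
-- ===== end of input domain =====

-- B replaces A's streaming accumulate-and-pad loop by a closed-form padded length plus
-- arithmetic slicing (objective: alternative, same cost); equivalence is proved for N ≥ 1.

-- ===== PORT A =====
-- the 'while len(current_chunk) < N: current_chunk.append(' ')' loop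
def pvPadWhile (N : Int) (chunk : List String) : List String :=
  if (chunk.length : Int) < N then pvPadWhile N (chunk ++ [" "]) else chunk
termination_by (N - chunk.length).toNat
decreasing_by simp; omega

def build_matrix_from_text_py (text : String) (N : Int) : List (List String) :=
  let st := text.toList.foldl
    (fun (st : List (List String) × List String) c =>
      let chunk := st.2 ++ [String.ofList [c]]
      if (chunk.length : Int) = N then (st.1 ++ [chunk], []) else (st.1, chunk))
    ([], [])
  st.1 ++ [pvPadWhile N st.2]

-- ===== PORT B =====
def build_matrix_from_text_py_alt (text : String) (N : Int) : List (List String) :=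
  let L : Int := text.toList.length
  let total : Int := (PySem.Int.floordiv L N + 1) * N
  let padded : List String :=
    text.toList.map (fun c => String.ofList [c]) ++ List.replicate (total - L).toNat " "
  (PySem.List.pyRange 0 total N).map (fun i => PySem.List.slice padded (some i) (some (i + N)))

-- ===== PRECONDITION & SPEC =====
-- Pre_ restricts to positive chunk sizes, the function's natural domain: for N ≤ 0 A
-- accidentally returns the whole text as a single unpadded row (its pad loop never runs),
-- while B's closed-form arithmetic raises ZeroDivisionError at N = 0 and yields an empty
-- grid for N < 0 — a corner no caller of a row-chunker specifies.
def Pre_build_matrix_from_text_py (text : String) (N : Int) : Prop := 1 ≤ N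
instance (text : String) (N : Int) : Decidable (Pre_build_matrix_from_text_py text N) := by
  unfold Pre_build_matrix_from_text_py; infer_instance

def pvWitness_build_matrix_from_text_py : String × Int := ("hello", 2)

def Spec_build_matrix_from_text_py (text : String) (N : Int) (out : List (List String)) : Prop :=
  out = build_matrix_from_text_py_alt text N
instance (text : String) (N : Int) (out : List (List String)) :
    Decidable (Spec_build_matrix_from_text_py text N out) := by
  unfold Spec_build_matrix_from_text_py; infer_instance

-- ===== CLAIM (what is proved, stated in full; the proofs are below) =====
def Claim_equal_build_matrix_from_text_py : Prop :=
  ∀ (text : String) (N : Int), Dom_build_matrix_from_text_py text N →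
    Pre_build_matrix_from_text_py text N →
    Spec_build_matrix_from_text_py text N (build_matrix_from_text_py text N)

-- ===== LEMMAS AND PROOFS =====

-- common reference shape: rows of size m+1, the last row space-padded, with A's
-- always-present final (possibly all-space) row
def pvChunkSpec (m : Nat) (cs : List String) : List (List String) :=
  if h : cs.length < m + 1 then [cs ++ List.replicate (m + 1 - cs.length) " "]
  else cs.take (m + 1) :: pvChunkSpec m (cs.drop (m + 1))
termination_by cs.length
decreasing_by simp; omega

lemma pvChunkSpec_ge (m : Nat) (cs : List String) (h : ¬ cs.length < m + 1) :
    pvChunkSpec m cs = cs.take (m + 1) :: pvChunkSpec m (cs.drop (m + 1)) := by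
  rw [pvChunkSpec, dif_neg h]

-- the while-pad loop appends spaces up to length N
lemma pvPadWhile_eq (N : Int) (chunk : List String) :
    pvPadWhile N chunk = chunk ++ List.replicate (N - chunk.length).toNat " " := by
  fun_induction pvPadWhile N chunk with
  | case1 chunk h ih =>
      rw [ih]
      simp at h ⊢
      have e : N.toNat - chunk.length = (N - ((chunk.length:Int)+1)).toNat + 1 := by omega
      rw [e, List.replicate_succ]
  | case2 chunk h =>
      simp at h
      have e : (N - (chunk.length:Int)).toNat = 0 := by omega
      simp [e]

-- A's fold, started from a partially filled chunk, produces the reference shape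
lemma A_loop (m : Nat) (cs : List Char) : ∀ (res : List (List String)) (chunk : List String),
    chunk.length < m + 1 →
    (let st := cs.foldl
        (fun (st : List (List String) × List String) c =>
          let ch := st.2 ++ [String.ofList [c]]
          if (ch.length : Int) = ((m : Int) + 1) then (st.1 ++ [ch], []) else (st.1, ch))
        (res, chunk)
     st.1 ++ [pvPadWhile ((m : Int) + 1) st.2])
    = res ++ pvChunkSpec m (chunk ++ cs.map (fun c => String.ofList [c])) := by
  induction cs with
  | nil =>
      intro res chunk h
      simp only [List.foldl_nil, List.map_nil, List.append_nil]
      rw [pvPadWhile_eq, pvChunkSpec, dif_pos h]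
      have e : (((m : Int) + 1) - chunk.length).toNat = m + 1 - chunk.length := by omega
      rw [e]
  | cons c cs ih =>
      intro res chunk h
      simp only [List.foldl_cons, List.map_cons]
      by_cases hc : ((chunk ++ [String.ofList [c]]).length : Int) = ((m : Int) + 1)
      · rw [if_pos hc]
        have hlen : (chunk ++ [String.ofList [c]]).length = m + 1 := by exact_mod_cast hc
        have := ih (res ++ [chunk ++ [String.ofList [c]]]) [] (by simp)
        simp only [] at this ⊢
        rw [this]
        simp only [List.nil_append]
        have harr : chunk ++ String.ofList [c] :: cs.map (fun c => String.ofList [c])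
            = (chunk ++ [String.ofList [c]]) ++ cs.map (fun c => String.ofList [c]) := by simp
        rw [harr]
        have hge : ¬ ((chunk ++ [String.ofList [c]]) ++ cs.map (fun c => String.ofList [c])).length < m + 1 := by
          simp only [List.length_append, List.length_map] at hlen ⊢; omega
        have hle : m + 1 ≤ (chunk ++ [String.ofList [c]]).length := by omega
        rw [pvChunkSpec_ge m ((chunk ++ [String.ofList [c]]) ++ cs.map (fun c => String.ofList [c])) hge,
            List.take_append_of_le_length hle, List.drop_append_of_le_length hle,
            List.take_of_length_le (by omega), List.drop_of_length_le (by omega)]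
        simp
      · rw [if_neg hc]
        have hlt : (chunk ++ [String.ofList [c]]).length < m + 1 := by
          simp at hc ⊢; omega
        have := ih res (chunk ++ [String.ofList [c]]) hlt
        simp only [] at this ⊢
        rw [this]
        simp

-- B's row comprehension over the arithmetically padded list produces the reference shape
lemma B_loop (m : Nat) (cs : List String) :
    (List.range (cs.length / (m + 1) + 1)).map
      (fun j => ((cs ++ List.replicate ((cs.length / (m + 1) + 1) * (m + 1) - cs.length) " ").drop
          (j * (m + 1))).take (m + 1))
    = pvChunkSpec m cs := by
  induction hn : cs.length using Nat.strong_induction_on generalizing cs with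
  | _ n ih =>
  subst hn
  by_cases h : cs.length < m + 1
  · have hq : cs.length / (m + 1) = 0 := Nat.div_eq_of_lt h
    rw [pvChunkSpec, dif_pos h, hq]
    simp only [List.range_one, List.map_cons, List.map_nil, Nat.zero_mul, List.drop_zero,
      Nat.zero_add, Nat.one_mul]
    rw [List.take_of_length_le (by simp; omega)]
  · have h1 : m + 1 ≤ cs.length := Nat.le_of_not_lt h
    have hq : cs.length / (m + 1) = (cs.drop (m + 1)).length / (m + 1) + 1 := by
      rw [List.length_drop, Nat.div_eq_sub_div (by omega) h1]
    rw [pvChunkSpec_ge m cs h, hq]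
    rw [List.range_succ_eq_map, List.map_cons, List.map_map]
    have hL' : (cs.drop (m + 1)).length = cs.length - (m + 1) := List.length_drop ..
    -- pad counts agree
    have hpad : ((cs.drop (m + 1)).length / (m + 1) + 1 + 1) * (m + 1) - cs.length
        = ((cs.drop (m + 1)).length / (m + 1) + 1) * (m + 1) - (cs.drop (m + 1)).length := by
      have e1 : ((cs.drop (m + 1)).length / (m + 1) + 1 + 1) * (m + 1)
          = ((cs.drop (m + 1)).length / (m + 1) + 1) * (m + 1) + (m + 1) := by ring
      have e2 : ((cs.drop (m + 1)).length / (m + 1) + 1) * (m + 1)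
          = ((cs.drop (m + 1)).length / (m + 1)) * (m + 1) + (m + 1) := by ring
      have e3 := Nat.div_add_mod (cs.drop (m + 1)).length (m + 1)
      have e4 := Nat.mod_lt (cs.drop (m + 1)).length (show 0 < m + 1 by omega)
      omega
    congr 1
    · -- head row
      rw [Nat.zero_mul, List.drop_zero, List.take_append_of_le_length h1]
    · -- tail rows
      rw [← ih (cs.drop (m + 1)).length (by omega) (cs.drop (m + 1)) rfl]
      apply List.map_congr_left
      intro j hj
      simp only [Function.comp_apply]
      rw [hpad]
      have hdd : (cs ++ List.replicate (((cs.drop (m+1)).length / (m + 1) + 1) * (m + 1) - (cs.drop (m+1)).length) " ").drop (Nat.succ j * (m + 1))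
          = ((cs.drop (m + 1) ++ List.replicate (((cs.drop (m+1)).length / (m + 1) + 1) * (m + 1) - (cs.drop (m+1)).length) " ")).drop (j * (m + 1)) := by
        rw [← List.drop_append_of_le_length h1, List.drop_drop]
        congr 1
        simp only [Nat.succ_eq_add_one]
        ring
      rw [hdd]

-- the two ports agree for every positive chunk size
lemma pv_main (text : String) (N : Int) (hpre : 1 ≤ N) :
    build_matrix_from_text_py text N = build_matrix_from_text_py_alt text N := by
  obtain ⟨m, rfl⟩ : ∃ m : Nat, N = (m : Int) + 1 := ⟨(N - 1).toNat, by omega⟩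
  have hA : build_matrix_from_text_py text ((m : Int) + 1)
      = pvChunkSpec m (text.toList.map (fun c => String.ofList [c])) := by
    have := A_loop m text.toList [] [] (by simp)
    simpa [build_matrix_from_text_py] using this
  rw [hA]
  set n := m + 1 with hn
  clear_value n
  have hcast : ((m : Int) + 1) = ((n : Nat) : Int) := by omega
  rw [hcast]
  simp only [build_matrix_from_text_py_alt]
  set L := text.toList.length with hL
  clear_value L
  set T := (L / n + 1) * n with hTdef
  clear_value T
  rw [PySem.Int.floordiv_natCast L n]
  have hT : (((L / n : Nat) : Int) + 1) * ((n : Nat) : Int) = ((T : Nat) : Int) := by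
    rw [hTdef]; push_cast; ring
  have hTpos : 0 < T := by rw [hTdef]; exact Nat.mul_pos (Nat.succ_pos _) (by omega)
  have hK : (T + (n - 1)) / n = L / n + 1 := by
    rw [hTdef, Nat.mul_comm (L / n + 1) n, Nat.mul_add_div (by omega)]
    have h0 : (n - 1) / n = 0 := Nat.div_eq_of_lt (by omega)
    omega
  rw [hT, Int.toNat_sub T L]
  rw [PySem.List.pyRange_of_pos 0 ((T : Nat) : Int)
        (show (0 : Int) < ((n : Nat) : Int) by exact_mod_cast (by omega : 0 < n))]
  rw [if_pos (show (0 : Int) < ((T : Nat) : Int) by exact_mod_cast hTpos)]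
  have harith : (((T : Nat) : Int) - 0 + ((n : Nat) : Int) - 1)
      = (((T + (n - 1) : Nat)) : Int) := by
    clear hTdef hT hK
    omega
  rw [harith, ← Int.natCast_div, Int.toNat_natCast]
  rw [hK, List.map_map]
  have hcong : ∀ k ∈ List.range (L / n + 1),
      ((fun i => PySem.List.slice
          (text.toList.map (fun c => String.ofList [c]) ++ List.replicate (T - L) " ")
          (some i) (some (i + ((n : Nat) : Int)))) ∘ (fun k : Nat => 0 + ((n : Nat) : Int) * (k : Int))) k
      = (fun k : Nat =>
          ((text.toList.map (fun c => String.ofList [c]) ++ List.replicate (T - L) " ").drop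
            (k * n)).take n) k := by
    intro k _
    simp only [Function.comp_apply]
    have e1 : (0 + ((n : Nat) : Int) * (k : Int)) = (((k * n : Nat)) : Int) := by push_cast; ring
    rw [e1]
    exact PySem.List.slice_natCast_add _ (k * n) n
  rw [List.map_congr_left hcong]
  have hBl := B_loop m (text.toList.map (fun c => String.ofList [c]))
  simp only [List.length_map] at hBl
  rw [← hL, ← hn] at hBl
  rw [← hTdef] at hBl
  rw [hBl]

-- ===== VERDICT (by name: the statement is the Claim_ definition above) =====
theorem build_matrix_from_text_py_spec : Claim_equal_build_matrix_from_text_py := by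
  intro text N _ hpre
  unfold Pre_build_matrix_from_text_py at hpre
  unfold Spec_build_matrix_from_text_py
  exact pv_main text N hpre
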